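-- pv_equiv track=rewrite | github.com/orestpena/python_pirp | AdvancedLoops.py | screenSize
-- ===== SOURCE A (Python) =====
-- def horizontalVerticalCheck(h,v):
--     return h != v
--
-- def chooseGreaterH(h,v):
--     return h > v
--
-- def chooseGreaterV(h,v):
--     return v > h
--
-- def checkDivThree(h):
--     return h%3 != 0
--
-- def screenSize(horizontal,vertical):
--     if horizontalVerticalCheck(horizontal,vertical):
--         if chooseGreaterH(horizontal,vertical):
--             vertical = horizontal
--         if chooseGreaterV(horizontal,vertical):
--             horizontal = vertical
--     if checkDivThree(horizontal):
--         #findDivNumber(horizontal)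
--         while True:
--             horizontal = horizontal + 1
--             if horizontal%30 == 0:
--                 break
--     return horizontal
-- ===== SOURCE B (Python) =====
-- def screenSize(horizontal, vertical):
--     horizontal = max(horizontal, vertical)
--     if horizontal % 3 != 0:
--         horizontal += 30 - horizontal % 30
--     return horizontal
-- ===== Notes on version B (the rewrite author's own statement) =====
-- stated objective: simpler
-- what changed: Replaces the conditional swap pair with max() and the increment-until-divisible-by-30 loop with the closed-form horizontal += 30 - horizontal % 30.
import Mathlib
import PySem

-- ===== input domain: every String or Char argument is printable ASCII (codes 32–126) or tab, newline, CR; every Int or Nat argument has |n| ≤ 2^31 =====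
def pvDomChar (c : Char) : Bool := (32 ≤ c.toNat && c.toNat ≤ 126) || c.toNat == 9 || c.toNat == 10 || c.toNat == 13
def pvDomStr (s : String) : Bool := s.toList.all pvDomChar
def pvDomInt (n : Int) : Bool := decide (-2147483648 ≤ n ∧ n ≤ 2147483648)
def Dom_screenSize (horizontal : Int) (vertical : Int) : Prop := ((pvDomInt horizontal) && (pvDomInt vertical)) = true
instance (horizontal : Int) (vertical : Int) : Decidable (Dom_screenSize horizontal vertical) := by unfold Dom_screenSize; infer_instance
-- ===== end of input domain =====

-- B replaces A's conditional-swap pair with max() and A's increment-until-%30==0 loop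
-- with closed-form arithmetic (simpler, same result).

-- ===== PORT A =====
def horizontalVerticalCheck (h : Int) (v : Int) : Bool := h ≠ v
def chooseGreaterH (h : Int) (v : Int) : Bool := h > v
def chooseGreaterV (h : Int) (v : Int) : Bool := v > h
def checkDivThree (h : Int) : Bool := PySem.Int.mod h 3 ≠ 0

-- A's `while True: horizontal += 1; if horizontal % 30 == 0: break`
-- (fuel only makes the loop total for Lean; 30 steps always suffice and the lemma below uses that)
def screenSizeLoop (fuel : Nat) (horizontal : Int) : Int :=
  match fuel with
  | 0 => horizontal
  | n + 1 =>
    if PySem.Int.mod (horizontal + 1) 30 = 0 then horizontal + 1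
    else screenSizeLoop n (horizontal + 1)

def screenSize (horizontal : Int) (vertical : Int) : Int :=
  let (horizontal, vertical) :=
    if horizontalVerticalCheck horizontal vertical then
      let vertical := if chooseGreaterH horizontal vertical then horizontal else vertical
      let horizontal := if chooseGreaterV horizontal vertical then vertical else horizontal
      (horizontal, vertical)
    else (horizontal, vertical)
  let _ := vertical
  if checkDivThree horizontal then screenSizeLoop 30 horizontal else horizontal

-- ===== PORT B =====
def screenSize_alt (horizontal : Int) (vertical : Int) : Int :=
  let horizontal := max horizontal vertical
  if PySem.Int.mod horizontal 3 ≠ 0 then horizontal + (30 - PySem.Int.mod horizontal 30)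
  else horizontal

-- ===== PRECONDITION & SPEC =====
def Spec_screenSize (horizontal : Int) (vertical : Int) (out : Int) : Prop := out = screenSize_alt horizontal vertical
instance (horizontal : Int) (vertical : Int) (out : Int) : Decidable (Spec_screenSize horizontal vertical out) := by unfold Spec_screenSize; infer_instance

-- ===== CLAIM (what is proved, stated in full; the proofs are below) =====
def Claim_equal_screenSize : Prop := ∀ (horizontal : Int) (vertical : Int), Dom_screenSize horizontal vertical → Spec_screenSize horizontal vertical (screenSize horizontal vertical)

-- ===== LEMMAS AND PROOFS =====
theorem screenSizeLoop_eq (fuel : Nat) (h : Int)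
    (hf : (30 - PySem.Int.mod h 30).toNat ≤ fuel) :
    screenSizeLoop fuel h = h + (30 - PySem.Int.mod h 30) := by
  induction fuel generalizing h with
  | zero =>
    exfalso
    have h1 := PySem.Int.mod_eq_emod_of_pos (a := h) (b := 30) (by omega)
    omega
  | succ n ih =>
    have h1 := PySem.Int.mod_eq_emod_of_pos (a := h) (b := 30) (by omega)
    have h2 := PySem.Int.mod_eq_emod_of_pos (a := h + 1) (b := 30) (by omega)
    by_cases hz : PySem.Int.mod (h + 1) 30 = 0
    · rw [screenSizeLoop, if_pos hz]
      omega
    · rw [screenSizeLoop, if_neg hz, ih (h + 1) (by omega)]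
      omega

-- ===== VERDICT (by name: the statement is the Claim_ definition above) =====
theorem screenSize_spec : Claim_equal_screenSize := by
  intro h v _
  have key : ∀ m : Int, screenSizeLoop 30 m = m + (30 - PySem.Int.mod m 30) := fun m =>
    screenSizeLoop_eq 30 m (by
      have := PySem.Int.mod_eq_emod_of_pos (a := m) (b := 30) (by omega); omega)
  unfold Spec_screenSize screenSize screenSize_alt
    horizontalVerticalCheck chooseGreaterH chooseGreaterV checkDivThree
  simp only [key]
  by_cases hne : h = v
  · simp [hne]
  · by_cases hgt : h > v
    · have hm : max h v = h := max_eq_left (by omega)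
      simp [hne, hgt, hm]
    · have hv : v > h := by omega
      have hm : max h v = v := max_eq_right (by omega)
      simp [hne, hgt, hv, hm]
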